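-- pv_equiv track=rewrite | github.com/rlaishra/RCM | src/olak.py | upperBoundPrunnig
-- ===== SOURCE A (Python) =====
-- def upperBoundPrunnig(graph, L, L_nodes):
-- 	W = {}
-- 	UB = {u:0 for u in L_nodes}
-- 	lower = []
--
-- 	for u in L_nodes:
-- 		W[u] = [v for v in graph[u] if v in L_nodes and L_nodes[v] > L_nodes[u]]
--
-- 	N = sorted(L_nodes, key=L_nodes.get, reverse=True)
-- 	for u in N:
-- 		if len(W[u]) == 0:
-- 			UB[u] = 0
-- 		else:
-- 			UB[u] = sum([(UB[v] +1) for v in W[u]])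
-- 	return UB
-- ===== SOURCE B (Python) =====
-- def upperBoundPrunnig(graph, L, L_nodes):
-- 	# Path-counting relaxation: UB[u] = number of non-empty strictly-ascending
-- 	# paths starting at u; accumulate t <- H*t for len(L_nodes) rounds.
-- 	n = len(L_nodes)
-- 	t = {u: 1 for u in L_nodes}
-- 	UB = {u: 0 for u in L_nodes}
-- 	for _ in range(n):
-- 		t = {u: sum(t[v] for v in graph[u] if v in L_nodes and L_nodes[v] > L_nodes[u]) for u in L_nodes}
-- 		for u in L_nodes:
-- 			UB[u] += t[u]
-- 	return UB
-- ===== Notes on version B (the rewrite author's own statement) =====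
-- stated objective: alternative
-- what changed: Replaces A's build-W/sort-by-level/descending-accumulation pipeline with an iterative path-counting relaxation: UB[u] equals the number of non-empty strictly-ascending paths from u, accumulated over len(L_nodes) rounds of t <- H*t with no sorting and no adjacency pre-computation.
import Mathlib
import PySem

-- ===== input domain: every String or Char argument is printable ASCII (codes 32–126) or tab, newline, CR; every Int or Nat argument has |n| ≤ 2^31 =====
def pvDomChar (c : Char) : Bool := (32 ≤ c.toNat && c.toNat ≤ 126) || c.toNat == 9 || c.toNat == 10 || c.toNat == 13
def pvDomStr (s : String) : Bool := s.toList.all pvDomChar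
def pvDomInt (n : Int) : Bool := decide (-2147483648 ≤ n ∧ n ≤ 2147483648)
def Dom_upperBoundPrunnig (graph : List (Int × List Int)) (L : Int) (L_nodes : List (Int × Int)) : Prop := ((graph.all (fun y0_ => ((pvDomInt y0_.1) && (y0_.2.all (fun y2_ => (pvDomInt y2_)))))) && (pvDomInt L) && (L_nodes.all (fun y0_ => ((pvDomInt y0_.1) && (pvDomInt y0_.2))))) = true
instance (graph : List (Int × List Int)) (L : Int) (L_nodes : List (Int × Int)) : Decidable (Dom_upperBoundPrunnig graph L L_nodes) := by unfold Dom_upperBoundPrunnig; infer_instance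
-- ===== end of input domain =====

-- B replaces A's build-W/sort-by-level/descending-accumulate pipeline with an
-- iterative path-counting relaxation (n rounds of t ← H·t, no sorting); objective: alternative.

-- ===== PORT A =====
def upperBoundPrunnig (graph : List (Int × List Int)) (L : Int) (L_nodes : List (Int × Int)) : List (Int × Int) :=
  let G := PySem.Dict.ofList graph
  let LD := PySem.Dict.ofList L_nodes
  -- UB = {u:0 for u in L_nodes}
  let UB0 := LD.keys.foldl (fun d u => d.insert u (0 : Int)) PySem.Dict.empty
  -- for u in L_nodes: W[u] = [v for v in graph[u] if v in L_nodes and L_nodes[v] > L_nodes[u]]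
  let W := LD.keys.foldl (fun w u =>
      w.insert u ((G.getD u []).filter
        (fun v => LD.contains v && decide (LD.getD v 0 > LD.getD u 0)))) PySem.Dict.empty
  -- N = sorted(L_nodes, key=L_nodes.get, reverse=True)
  let N := PySem.List.sorted LD.keys (fun u => LD.getD u 0) true
  let UB := N.foldl (fun ub u =>
      if (W.getD u []).length = 0 then ub.insert u 0
      else ub.insert u (((W.getD u []).map (fun v => ub.getD v 0 + 1)).sum)) UB0
  UB.items

-- ===== PORT B =====
-- one round of Source B's loop body: recompute t, then UB[u] += t[u]
def pvStepB (G : PySem.Dict Int (List Int)) (LD : PySem.Dict Int Int) (s : PySem.Dict Int Int × PySem.Dict Int Int) :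
    PySem.Dict Int Int × PySem.Dict Int Int :=
  let t' := LD.keys.foldl (fun d u =>
      d.insert u (((G.getD u []).filter
          (fun v => LD.contains v && decide (LD.getD v 0 > LD.getD u 0))).map
            (fun v => s.1.getD v 0)).sum) PySem.Dict.empty
  let UB' := LD.keys.foldl (fun d u => d.insert u (d.getD u 0 + t'.getD u 0)) s.2
  (t', UB')

-- for _ in range(n): …
def pvLoopB (G : PySem.Dict Int (List Int)) (LD : PySem.Dict Int Int) : Nat → PySem.Dict Int Int × PySem.Dict Int Int →
    PySem.Dict Int Int × PySem.Dict Int Int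
  | 0, s => s
  | k + 1, s => pvLoopB G LD k (pvStepB G LD s)

def upperBoundPrunnig_alt (graph : List (Int × List Int)) (L : Int) (L_nodes : List (Int × Int)) : List (Int × Int) :=
  let G := PySem.Dict.ofList graph
  let LD := PySem.Dict.ofList L_nodes
  let t0 := LD.keys.foldl (fun d u => d.insert u (1 : Int)) PySem.Dict.empty
  let UB0 := LD.keys.foldl (fun d u => d.insert u (0 : Int)) PySem.Dict.empty
  (pvLoopB G LD LD.size (t0, UB0)).2.items

-- ===== PRECONDITION & SPEC =====
-- Pre_ excludes exactly the inputs where Python A raises KeyError: a node of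
-- L_nodes missing from graph (graph[u] in the W-building loop).
def Pre_upperBoundPrunnig (graph : List (Int × List Int)) (L : Int) (L_nodes : List (Int × Int)) : Prop :=
  ∀ p ∈ L_nodes, ∃ q ∈ graph, q.1 = p.1
instance (graph : List (Int × List Int)) (L : Int) (L_nodes : List (Int × Int)) : Decidable (Pre_upperBoundPrunnig graph L L_nodes) := by unfold Pre_upperBoundPrunnig; infer_instance

def pvWitness_upperBoundPrunnig : (List (Int × List Int)) × Int × (List (Int × Int)) :=
  ([(0, [1, 2]), (1, [2]), (2, [])], 0, [(0, 1), (1, 2), (2, 3)])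

def Spec_upperBoundPrunnig (graph : List (Int × List Int)) (L : Int) (L_nodes : List (Int × Int)) (out : List (Int × Int)) : Prop := out = upperBoundPrunnig_alt graph L L_nodes
instance (graph : List (Int × List Int)) (L : Int) (L_nodes : List (Int × Int)) (out : List (Int × Int)) : Decidable (Spec_upperBoundPrunnig graph L L_nodes out) := by unfold Spec_upperBoundPrunnig; infer_instance

-- ===== CLAIM (what is proved, stated in full; the proofs are below) =====
def Claim_equal_upperBoundPrunnig : Prop := ∀ (graph : List (Int × List Int)) (L : Int) (L_nodes : List (Int × Int)), Dom_upperBoundPrunnig graph L L_nodes → Pre_upperBoundPrunnig graph L L_nodes → Spec_upperBoundPrunnig graph L L_nodes (upperBoundPrunnig graph L L_nodes)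

-- ===== LEMMAS AND PROOFS =====

-- the list of higher-level neighbours of u (what A stores as W[u] and B filters each round)
def pvH (G : PySem.Dict Int (List Int)) (LD : PySem.Dict Int Int) (u : Int) : List Int :=
  (G.getD u []).filter (fun v => LD.contains v && decide (LD.getD v 0 > LD.getD u 0))

-- recursion measure: how many keys of LD have a strictly larger level than u
def pvM (LD : PySem.Dict Int Int) (u : Int) : Nat :=
  (LD.keys.filter (fun k => decide (LD.getD k 0 > LD.getD u 0))).length

theorem pvCountP_strict {α : Type} (l : List α) (p q : α → Bool)
    (hmono : ∀ x ∈ l, p x = true → q x = true) {a : α} (ha : a ∈ l)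
    (hap : p a = false) (haq : q a = true) : (l.filter p).length < (l.filter q).length := by
  rw [← List.countP_eq_length_filter, ← List.countP_eq_length_filter]
  induction l with
  | nil => cases ha
  | cons x t ih =>
    simp only [List.countP_cons]
    rcases List.mem_cons.1 ha with rfl | hat
    · simp only [hap, haq, Bool.false_eq_true, if_false, if_true]
      have h3 : t.countP p ≤ t.countP q :=
        List.countP_mono_left (fun x hx => hmono x (List.mem_cons_of_mem _ hx))
      omega
    · have h1 := ih (fun x hx => hmono x (List.mem_cons_of_mem _ hx)) hat
      have h2 : (if p x = true then 1 else 0) ≤ (if q x = true then 1 else 0) := by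
        split_ifs with h h'
        · omega
        · exact absurd (hmono x (List.mem_cons_self) h) h'
        · omega
        · omega
      omega

theorem pvH_mem (G : PySem.Dict Int (List Int)) (LD : PySem.Dict Int Int) (u v : Int)
    (hv : v ∈ pvH G LD u) : v ∈ LD.keys ∧ LD.getD u 0 < LD.getD v 0 := by
  have hb := (List.mem_filter.1 hv).2
  simp only [Bool.and_eq_true, decide_eq_true_eq] at hb
  exact ⟨(PySem.Dict.contains_iff_mem_keys LD v).1 hb.1, hb.2⟩

theorem pvM_lt (G : PySem.Dict Int (List Int)) (LD : PySem.Dict Int Int) (u v : Int)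
    (hv : v ∈ pvH G LD u) : pvM LD v < pvM LD u := by
  obtain ⟨hvk, hlt⟩ := pvH_mem G LD u v hv
  exact pvCountP_strict LD.keys _ _
    (fun k _ h => by
      simp only [decide_eq_true_eq] at h ⊢
      omega)
    hvk (by simp) (by simp [hlt])

def pvUB (G : PySem.Dict Int (List Int)) (LD : PySem.Dict Int Int) (u : Int) : Int :=
  ((pvH G LD u).attach.map (fun x => pvUB G LD x.1 + 1)).sum
termination_by pvM LD u
decreasing_by exact pvM_lt G LD u x.1 x.2

theorem pvUB_eq (G : PySem.Dict Int (List Int)) (LD : PySem.Dict Int Int) (u : Int) :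
    pvUB G LD u = ((pvH G LD u).map (fun v => pvUB G LD v + 1)).sum := by
  rw [pvUB]
  simp

-- number of strictly-ascending paths with exactly k edges starting at u
def pvPC (G : PySem.Dict Int (List Int)) (LD : PySem.Dict Int Int) : Nat → Int → Int
  | 0, _ => 1
  | k + 1, u => ((pvH G LD u).map (fun v => pvPC G LD k v)).sum

theorem pvSum_swap {α β : Type} (l1 : List α) (l2 : List β) (f : α → β → Int) :
    (l1.map (fun a => ((l2.map (fun b => f a b)).sum))).sum
      = (l2.map (fun b => ((l1.map (fun a => f a b)).sum))).sum := by
  induction l1 with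
  | nil => simp
  | cons x t ih => simp [ih]

theorem pvUB_sum (G : PySem.Dict Int (List Int)) (LD : PySem.Dict Int Int) :
    ∀ (n : Nat) (u : Int) (K : Nat), pvM LD u = n → n < K →
    pvUB G LD u = ((List.range K).map (fun j => pvPC G LD (j + 1) u)).sum := by
  intro n
  induction n using Nat.strong_induction_on with
  | _ n ih =>
    intro u K hn hK
    obtain ⟨M, rfl⟩ : ∃ M, K = M + 1 := ⟨K - 1, by omega⟩
    have h1 : ((List.range (M + 1)).map (fun j => pvPC G LD (j + 1) u)).sum
        = ((pvH G LD u).map (fun v => ((List.range (M + 1)).map (fun j => pvPC G LD j v)).sum)).sum := by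
      have he : ∀ j ∈ List.range (M + 1),
          pvPC G LD (j + 1) u = ((pvH G LD u).map (fun v => pvPC G LD j v)).sum := fun j _ => rfl
      rw [List.map_congr_left he, pvSum_swap]
    rw [h1, pvUB_eq]
    refine congrArg List.sum (List.map_congr_left ?_)
    intro v hv
    have hlt := pvM_lt G LD u v hv
    rw [List.range_succ_eq_map, List.map_cons, List.sum_cons, List.map_map]
    have h2 : ((List.range M).map (fun j => pvPC G LD (j + 1) v)).sum = pvUB G LD v :=
      (ih (pvM LD v) (by omega) v M rfl (by omega)).symm
    have h3 : ((List.range M).map ((fun j => pvPC G LD j v) ∘ Nat.succ)).sum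
        = ((List.range M).map (fun j => pvPC G LD (j + 1) v)).sum := rfl
    rw [h3, h2]
    simp [pvPC]
    omega

-- dict fold helpers
theorem pvGetD_foldl_insertF_not_mem {ν : Type} (l : List Int) (F : PySem.Dict Int ν → Int → ν)
    (d : PySem.Dict Int ν) (u : Int) (d0 : ν) (hu : u ∉ l) :
    (l.foldl (fun d x => d.insert x (F d x)) d).getD u d0 = d.getD u d0 := by
  induction l generalizing d with
  | nil => rfl
  | cons x t ih =>
    simp only [List.foldl_cons]
    rw [ih _ (fun h => hu (List.mem_cons_of_mem _ h))]
    exact PySem.Dict.getD_insert_of_ne _ _ _ (fun h => hu (h ▸ List.mem_cons_self))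

-- fold inserting a value computed from the entry being replaced (covers constant values too)
theorem pvGetD_foldl_insertg_mem {ν : Type} (l : List Int) (g : ν → Int → ν)
    (d : PySem.Dict Int ν) (u : Int) (d0 : ν) (hl : l.Nodup) (hu : u ∈ l) :
    (l.foldl (fun d x => d.insert x (g (d.getD x d0) x)) d).getD u d0 = g (d.getD u d0) u := by
  induction l generalizing d with
  | nil => cases hu
  | cons x t ih =>
    simp only [List.foldl_cons]
    rcases List.mem_cons.1 hu with rfl | hut
    · have hx : u ∉ t := (List.nodup_cons.1 hl).1
      rw [pvGetD_foldl_insertF_not_mem t _ _ u d0 hx, PySem.Dict.getD_insert_self]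
    · have hne : u ≠ x := fun h => (List.nodup_cons.1 hl).1 (h ▸ hut)
      rw [ih _ ((List.nodup_cons.1 hl).2) hut, PySem.Dict.getD_insert_of_ne _ _ _ hne]

theorem pvGetD_foldl_insertC_mem {ν : Type} (l : List Int) (F : Int → ν)
    (d : PySem.Dict Int ν) (u : Int) (d0 : ν) (hl : l.Nodup) (hu : u ∈ l) :
    (l.foldl (fun d x => d.insert x (F x)) d).getD u d0 = F u :=
  pvGetD_foldl_insertg_mem l (fun _ x => F x) d u d0 hl hu

theorem pvSet_update_self (s : PySem.Set Int) (l : List Int) (h : ∀ x ∈ l, x ∈ s) :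
    PySem.Set.update s l = s := by
  induction l generalizing s with
  | nil => rfl
  | cons x t ih =>
    show PySem.Set.update (s.add x) t = s
    rw [PySem.Set.add_of_mem (h x List.mem_cons_self)]
    exact ih s (fun y hy => h y (List.mem_cons_of_mem _ hy))

theorem pvSet_update_append (l : List Int) (h : l.Nodup) :
    ∀ (s : PySem.Set Int), (∀ x ∈ l, x ∉ s) → PySem.Set.update s l = s ++ l := by
  induction l with
  | nil => intro s _; simp [PySem.Set.update]
  | cons x t ih =>
    intro s hs
    show PySem.Set.update (s.add x) t = s ++ x :: t
    rw [PySem.Set.add_of_not_mem (hs x List.mem_cons_self)]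
    rw [ih (List.nodup_cons.1 h).2 (s ++ [x]) ?_]
    · simp
    · intro y hy hmem
      rcases List.mem_append.1 hmem with h1 | h1
      · exact hs y (List.mem_cons_of_mem _ hy) h1
      · exact (List.nodup_cons.1 h).1 ((List.mem_singleton.1 h1) ▸ hy)

theorem pvSet_ofList_self (l : List Int) (h : l.Nodup) : PySem.Set.ofList l = l := by
  rw [PySem.Set.ofList_eq_foldl]
  have := pvSet_update_append l h PySem.Set.empty (by intro x _ hx; cases hx)
  simpa [PySem.Set.update, PySem.Set.empty] using this

-- A's descending accumulation computes pvUB at every key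
theorem pvA_fold (G : PySem.Dict Int (List Int)) (LD : PySem.Dict Int Int)
    (W : PySem.Dict Int (List Int)) (hW : ∀ u ∈ LD.keys, W.getD u [] = pvH G LD u) :
    ∀ (N' : List Int) (ub : PySem.Dict Int Int),
    N'.Pairwise (fun a b => LD.getD b 0 ≤ LD.getD a 0) → N'.Nodup →
    (∀ a ∈ N', a ∈ LD.keys) →
    (∀ v ∈ LD.keys, v ∉ N' → ub.getD v 0 = pvUB G LD v) →
    ∀ v ∈ LD.keys,
      (N'.foldl (fun ub u =>
        if (W.getD u []).length = 0 then ub.insert u 0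
        else ub.insert u (((W.getD u []).map (fun v => ub.getD v 0 + 1)).sum)) ub).getD v 0
      = pvUB G LD v := by
  intro N'
  induction N' with
  | nil => intro ub _ _ _ hb v hv; exact hb v hv (by simp)
  | cons u t ih =>
    intro ub hpw hnd hmem hb v hv
    have huk : u ∈ LD.keys := hmem u List.mem_cons_self
    have hWu : W.getD u [] = pvH G LD u := hW u huk
    have hins : (if (W.getD u []).length = 0 then ub.insert u 0
        else ub.insert u (((W.getD u []).map (fun v => ub.getD v 0 + 1)).sum))
        = ub.insert u (pvUB G LD u) := by
      split_ifs with h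
      · rw [hWu] at h
        have hnil : pvH G LD u = [] := List.length_eq_zero_iff.1 h
        rw [pvUB_eq, hnil]
        rfl
      · congr 1
        rw [hWu, pvUB_eq]
        refine congrArg List.sum (List.map_congr_left ?_)
        intro w hw
        obtain ⟨hwk, hwlt⟩ := pvH_mem G LD u w hw
        have hwnot : w ∉ u :: t := by
          intro hwN
          rcases List.mem_cons.1 hwN with rfl | hwt
          · omega
          · have := (List.pairwise_cons.1 hpw).1 w hwt
            omega
        rw [hb w hwk hwnot]
    simp only [List.foldl_cons, hins]
    refine ih (ub.insert u (pvUB G LD u)) (List.pairwise_cons.1 hpw).2 (List.nodup_cons.1 hnd).2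
      (fun a ha => hmem a (List.mem_cons_of_mem _ ha)) ?_ v hv
    intro w hwk hwt
    by_cases hwu : w = u
    · subst hwu
      rw [PySem.Dict.getD_insert_self]
    · rw [PySem.Dict.getD_insert_of_ne _ _ _ hwu]
      exact hb w hwk (by simp [hwu, hwt])

theorem pvLoopB_succ (G : PySem.Dict Int (List Int)) (LD : PySem.Dict Int Int) (k : Nat)
    (s : PySem.Dict Int Int × PySem.Dict Int Int) :
    pvLoopB G LD (k + 1) s = pvStepB G LD (pvLoopB G LD k s) := by
  induction k generalizing s with
  | zero => rfl
  | succ k ih =>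
    show pvLoopB G LD (k + 1) (pvStepB G LD s) = pvStepB G LD (pvLoopB G LD (k + 1) s)
    rw [ih]
    rfl

-- B's iteration invariant: after k rounds t holds pvPC k and UB the partial sums
theorem pvB_inv (G : PySem.Dict Int (List Int)) (LD : PySem.Dict Int Int)
    (hnd : LD.keys.Nodup)
    (t0 UB0 : PySem.Dict Int Int)
    (ht0 : ∀ u ∈ LD.keys, t0.getD u 0 = 1)
    (hUB0 : ∀ u ∈ LD.keys, UB0.getD u 0 = 0) (hk0 : UB0.keys = LD.keys) :
    ∀ (k : Nat),
      (∀ u ∈ LD.keys, (pvLoopB G LD k (t0, UB0)).1.getD u 0 = pvPC G LD k u) ∧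
      (∀ u ∈ LD.keys, (pvLoopB G LD k (t0, UB0)).2.getD u 0
        = ((List.range k).map (fun j => pvPC G LD (j + 1) u)).sum) ∧
      (pvLoopB G LD k (t0, UB0)).2.keys = LD.keys := by
  intro k
  induction k with
  | zero =>
    refine ⟨fun u hu => ht0 u hu, fun u hu => by simpa using hUB0 u hu, hk0⟩
  | succ k ih =>
    obtain ⟨ih1, ih2, ih3⟩ := ih
    rw [pvLoopB_succ]
    set s := pvLoopB G LD k (t0, UB0) with hs
    have ht' : ∀ u ∈ LD.keys,
        (pvStepB G LD s).1.getD u 0 = pvPC G LD (k + 1) u := by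
      intro u hu
      have hC := pvGetD_foldl_insertC_mem LD.keys
        (fun x => ((pvH G LD x).map (fun v => s.1.getD v 0)).sum) PySem.Dict.empty u 0 hnd hu
      have hrest : ((pvH G LD u).map (fun v => s.1.getD v 0)).sum = pvPC G LD (k + 1) u := by
        rw [List.map_congr_left (fun v hv => ih1 v (pvH_mem G LD u v hv).1)]
        rfl
      exact hC.trans hrest
    refine ⟨ht', ?_, ?_⟩
    · intro u hu
      have hG := pvGetD_foldl_insertg_mem LD.keys
        (fun old x => old + (pvStepB G LD s).1.getD x 0) s.2 u 0 hnd hu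
      refine hG.trans ?_
      beta_reduce
      rw [ih2 u hu, ht' u hu, List.range_succ, List.map_append, List.sum_append]
      simp
    · have hK : (LD.keys.foldl
          (fun d u => d.insert u (d.getD u 0 + (pvStepB G LD s).1.getD u 0)) s.2).keys = LD.keys := by
        rw [PySem.Dict.keys_foldl_insert, ih3, pvSet_update_self _ _ (fun x hx => hx)]
      exact hK

theorem pvKeys0 {ν : Type} (LD : PySem.Dict Int Int) (c : ν) (hnd : LD.keys.Nodup) :
    (LD.keys.foldl (fun d u => d.insert u c) (PySem.Dict.empty : PySem.Dict Int ν)).keys = LD.keys := by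
  rw [PySem.Dict.keys_foldl_insert]
  have : (PySem.Dict.empty : PySem.Dict Int ν).keys = ([] : List Int) := by
    simp [pysem]
  rw [this]
  exact pvSet_ofList_self _ hnd

theorem pvA_result (graph : List (Int × List Int)) (L : Int) (L_nodes : List (Int × Int)) :
    upperBoundPrunnig graph L L_nodes
      = (PySem.Dict.ofList L_nodes).keys.map (fun k =>
          (k, pvUB (PySem.Dict.ofList graph) (PySem.Dict.ofList L_nodes) k)) := by
  set G := PySem.Dict.ofList graph with hGdef
  set LD := PySem.Dict.ofList L_nodes with hLDdef
  have hnd : LD.keys.Nodup := PySem.Dict.nodup_keys_ofList _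
  set UB0 := LD.keys.foldl (fun d u => d.insert u (0 : Int)) PySem.Dict.empty with hUB0def
  set W := LD.keys.foldl (fun w u =>
      w.insert u ((G.getD u []).filter
        (fun v => LD.contains v && decide (LD.getD v 0 > LD.getD u 0)))) PySem.Dict.empty with hWdef
  set N := PySem.List.sorted LD.keys (fun u => LD.getD u 0) true with hNdef
  have hdef : upperBoundPrunnig graph L L_nodes
      = (N.foldl (fun ub u =>
          if (W.getD u []).length = 0 then ub.insert u 0
          else ub.insert u (((W.getD u []).map (fun v => ub.getD v 0 + 1)).sum)) UB0).items := rfl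
  rw [hdef]
  have hW : ∀ u ∈ LD.keys, W.getD u [] = pvH G LD u := by
    intro u hu
    exact pvGetD_foldl_insertC_mem LD.keys
      (fun x => (G.getD x []).filter
        (fun v => LD.contains v && decide (LD.getD v 0 > LD.getD x 0))) PySem.Dict.empty u [] hnd hu
  have hperm : N.Perm LD.keys := PySem.List.sorted_perm LD.keys (fun u => LD.getD u 0) true
  have hNpw : N.Pairwise (fun a b => LD.getD b 0 ≤ LD.getD a 0) :=
    PySem.List.sorted_pairwise_rev LD.keys (fun u => LD.getD u 0)
  have hNnd : N.Nodup := hperm.nodup_iff.2 hnd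
  have hNmem : ∀ a ∈ N, a ∈ LD.keys := fun a ha => hperm.mem_iff.1 ha
  have hvals := pvA_fold G LD W hW N UB0 hNpw hNnd hNmem
    (fun v hv hvn => absurd (hperm.mem_iff.2 hv) hvn)
  have hkeys0 : UB0.keys = LD.keys := pvKeys0 LD 0 hnd
  have hfeq : (fun (ub : PySem.Dict Int Int) u =>
      if (W.getD u []).length = 0 then ub.insert u 0
      else ub.insert u (((W.getD u []).map (fun v => ub.getD v 0 + 1)).sum))
      = (fun ub u => ub.insert u
          (if (W.getD u []).length = 0 then 0
           else ((W.getD u []).map (fun v => ub.getD v 0 + 1)).sum)) := by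
    funext ub u
    split_ifs <;> rfl
  have hkeysA : (N.foldl (fun ub u =>
      if (W.getD u []).length = 0 then ub.insert u 0
      else ub.insert u (((W.getD u []).map (fun v => ub.getD v 0 + 1)).sum)) UB0).keys = LD.keys := by
    rw [hfeq, PySem.Dict.keys_foldl_insert, hkeys0]
    exact pvSet_update_self _ _ hNmem
  rw [PySem.Dict.items_eq_map_keys _ (by rw [hkeysA]; exact hnd) 0, hkeysA]
  refine List.map_congr_left ?_
  intro k hk
  rw [hvals k hk]

theorem pvB_result (graph : List (Int × List Int)) (L : Int) (L_nodes : List (Int × Int)) :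
    upperBoundPrunnig_alt graph L L_nodes
      = (PySem.Dict.ofList L_nodes).keys.map (fun k =>
          (k, ((List.range (PySem.Dict.ofList L_nodes).size).map
            (fun j => pvPC (PySem.Dict.ofList graph) (PySem.Dict.ofList L_nodes) (j + 1) k)).sum)) := by
  set G := PySem.Dict.ofList graph with hGdef
  set LD := PySem.Dict.ofList L_nodes with hLDdef
  have hnd : LD.keys.Nodup := PySem.Dict.nodup_keys_ofList _
  set t0 := LD.keys.foldl (fun d u => d.insert u (1 : Int)) PySem.Dict.empty with ht0def
  set UB0 := LD.keys.foldl (fun d u => d.insert u (0 : Int)) PySem.Dict.empty with hUB0def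
  have hdef : upperBoundPrunnig_alt graph L L_nodes
      = (pvLoopB G LD LD.size (t0, UB0)).2.items := rfl
  rw [hdef]
  have ht0 : ∀ u ∈ LD.keys, t0.getD u 0 = 1 := fun u hu =>
    pvGetD_foldl_insertC_mem LD.keys (fun _ => (1 : Int)) PySem.Dict.empty u 0 hnd hu
  have hUB0 : ∀ u ∈ LD.keys, UB0.getD u 0 = 0 := fun u hu =>
    pvGetD_foldl_insertC_mem LD.keys (fun _ => (0 : Int)) PySem.Dict.empty u 0 hnd hu
  obtain ⟨_, hv, hk⟩ := pvB_inv G LD hnd t0 UB0 ht0 hUB0 (pvKeys0 LD 0 hnd) LD.size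
  rw [PySem.Dict.items_eq_map_keys _ (by rw [hk]; exact hnd) 0, hk]
  refine List.map_congr_left ?_
  intro k hkk
  rw [hv k hkk]

-- ===== VERDICT (by name: the statement is the Claim_ definition above) =====
theorem upperBoundPrunnig_spec : Claim_equal_upperBoundPrunnig := by
  intro graph L L_nodes _ _
  unfold Spec_upperBoundPrunnig
  rw [pvA_result graph L L_nodes, pvB_result graph L L_nodes]
  set G := PySem.Dict.ofList graph
  set LD := PySem.Dict.ofList L_nodes
  have hnd : LD.keys.Nodup := PySem.Dict.nodup_keys_ofList _
  refine List.map_congr_left ?_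
  intro u hu
  have hsize : LD.keys.length = LD.size := by
    simp [PySem.Dict.keys, PySem.Dict.size]
  have hlt : pvM LD u < LD.size := by
    rw [← hsize]
    have h1 : (LD.keys.filter (fun k => decide (LD.getD k 0 > LD.getD u 0))).length
        < (LD.keys.filter (fun _ => true)).length :=
      pvCountP_strict LD.keys _ _ (fun _ _ _ => rfl) hu (by simp) rfl
    simpa [pvM, List.filter_true] using h1
  rw [pvUB_sum G LD (pvM LD u) u LD.size rfl hlt]
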